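-- pv_equiv track=rewrite | github.com/yundevingV/Algorithm_ | 프로그래머스/2/132265. 롤케이크 자르기/롤케이크 자르기.py | solution
-- ===== SOURCE A (Python) =====
-- from collections import Counter
--
-- def solution(topping):
--     answer = 0;
--     dict = Counter(topping);
--     set_dict = set();
--     for i in topping :
--         dict[i] -= 1;
--         set_dict.add(i);
--         if dict[i] == 0 :
--             dict.pop(i);
--         if len(dict) == len(set_dict) :
--             answer += 1;
--     return answer
-- ===== SOURCE B (Python) =====
-- from collections import deque
--
-- def solution(topping):
--     # suffix table: right[i] = number of distinct toppings in topping[i:], right[n] = 0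
--     right = deque([0])
--     seen = set()
--     for x in reversed(topping):
--         seen.add(x)
--         right.appendleft(len(seen))
--     right = list(right)
--     left = set()
--     answer = 0
--     for i, x in enumerate(topping):
--         left.add(x)
--         if len(left) == right[i + 1]:
--             answer += 1
--     return answer
-- ===== Notes on version B (the rewrite author's own statement) =====
-- stated objective: alternative
-- what changed: Instead of decrementing a running Counter of the whole list and popping exhausted keys, B precomputes a suffix-distinct table with one backward pass into a growing set and then counts matches in a forward pass over a growing left set.
import Mathlib
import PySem

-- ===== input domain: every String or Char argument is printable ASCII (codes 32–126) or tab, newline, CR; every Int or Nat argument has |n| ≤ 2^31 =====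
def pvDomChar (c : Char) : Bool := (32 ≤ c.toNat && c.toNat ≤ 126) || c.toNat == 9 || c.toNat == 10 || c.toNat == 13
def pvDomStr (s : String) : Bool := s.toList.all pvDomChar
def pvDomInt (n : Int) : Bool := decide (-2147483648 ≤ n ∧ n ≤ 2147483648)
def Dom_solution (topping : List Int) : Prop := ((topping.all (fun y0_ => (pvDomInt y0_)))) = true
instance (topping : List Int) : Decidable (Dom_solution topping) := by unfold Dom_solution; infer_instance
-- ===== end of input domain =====

-- B replaces A's running Counter decrement with a precomputed suffix-distinct table plus a
-- forward growing set (alternative decomposition, same O(n) cost).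

-- ===== PORT A =====
-- the for-loop of A, state (answer, dict, set_dict)
def loopA : List Int → Int → PySem.Dict Int Int → PySem.Set Int → Int
  | [], ans, _, _ => ans
  | i :: rest, ans, d, s =>
    let d1 := d.modify i 0 (· - 1)            -- dict[i] -= 1
    let s1 := PySem.Set.add s i               -- set_dict.add(i)
    let d2 := if d1.getD i 0 == 0 then d1.erase i else d1   -- if dict[i] == 0: dict.pop(i)
    let ans1 := if (d2.size : Int) == PySem.Set.len s1 then ans + 1 else ans
    loopA rest ans1 d2 s1

def solution (topping : List Int) : Int :=
  loopA topping 0 (PySem.Dict.counter topping) PySem.Set.empty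

-- ===== PORT B =====
-- the forward pass of B: walks topping together with right[1:], growing the left set
def fwdB : List Int → List Int → PySem.Set Int → Int
  | [], _, _ => 0
  | x :: xs, r, left =>
    let left1 := PySem.Set.add left x
    let ans := if PySem.Set.len left1 == r.headD 0 then (1 : Int) else 0
    ans + fwdB xs r.tail left1

def solution_alt (topping : List Int) : Int :=
  -- deque built by appendleft over reversed(topping): foldl over the reverse, consing
  let p := topping.reverse.foldl
    (fun (st : List Int × PySem.Set Int) x =>
      let seen := PySem.Set.add st.2 x
      (PySem.Set.len seen :: st.1, seen)) ([0], PySem.Set.empty)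
  fwdB topping p.1.tail PySem.Set.empty

-- ===== PRECONDITION & SPEC =====
def Spec_solution (topping : List Int) (out : Int) : Prop := out = solution_alt topping
instance (topping : List Int) (out : Int) : Decidable (Spec_solution topping out) := by unfold Spec_solution; infer_instance

-- ===== CLAIM (what is proved, stated in full; the proofs are below) =====
def Claim_equal_solution : Prop := ∀ (topping : List Int), Dom_solution topping → Spec_solution topping (solution topping)

-- ===== LEMMAS AND PROOFS =====

-- distinct count of a list
def Dd (xs : List Int) : Nat := (PySem.Set.ofList xs).length

-- common abstraction of both loops: at each step compare distinct(suffix) with |left set|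
def countSpec : List Int → PySem.Set Int → Int
  | [], _ => 0
  | x :: xs, s =>
    (if Dd xs = (PySem.Set.add s x).length then (1 : Int) else 0) + countSpec xs (PySem.Set.add s x)

-- the table B builds: suffTable xs = [distinct xs[0:], distinct xs[1:], …, 0]
def suffTable : List Int → List Int
  | [] => [0]
  | x :: xs => (Dd (x :: xs) : Int) :: suffTable xs

theorem len_eq_of_mem_iff (s t : List Int) (hs : s.Nodup) (ht : t.Nodup)
    (h : ∀ x, x ∈ s ↔ x ∈ t) : s.length = t.length := by
  rw [← List.toFinset_card_of_nodup hs, ← List.toFinset_card_of_nodup ht]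
  congr 1
  ext a
  simp [h a]

theorem len_eq_Dd (s : PySem.Set Int) (xs : List Int) (hs : s.Nodup)
    (h : ∀ x, x ∈ s ↔ x ∈ xs) : s.length = Dd xs :=
  len_eq_of_mem_iff s (PySem.Set.ofList xs) hs (PySem.Set.nodup_ofList xs)
    (fun x => (h x).trans (PySem.Set.mem_ofList xs x).symm)

theorem size_eq_Dd (d : PySem.Dict Int Int) (xs : List Int) (hnd : d.keys.Nodup)
    (h : ∀ k, k ∈ d.keys ↔ k ∈ xs) : d.size = Dd xs := by
  have hlen : d.size = d.keys.length := by
    simp [PySem.Dict.size, PySem.Dict.keys]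
  rw [hlen]
  exact len_eq_Dd d.keys xs hnd h

theorem keys_erase_eq (d : PySem.Dict Int Int) (k : Int) :
    (d.erase k).keys = d.keys.filter (fun a => !(a == k)) := by
  obtain ⟨items⟩ := d
  simp only [PySem.Dict.erase, PySem.Dict.keys]
  induction items with
  | nil => rfl
  | cons p t ih =>
    by_cases hp : p.1 = k
    · simp [hp, ih]
    · simp [hp, ih]

theorem find?_filter_ne (l : List (Int × Int)) (k k' : Int) (hne : k' ≠ k) :
    (l.filter (fun p => !(p.1 == k))).find? (fun p => p.1 == k') = l.find? (fun p => p.1 == k') := by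
  induction l with
  | nil => rfl
  | cons p t ih =>
    by_cases hp : p.1 = k
    · have h1 : List.filter (fun p => !(p.1 == k)) (p :: t) = List.filter (fun p => !(p.1 == k)) t := by
        simp [hp]
      rw [h1, ih, List.find?_cons_of_neg (by simp [hp]; omega)]
    · have h1 : List.filter (fun p => !(p.1 == k)) (p :: t)
          = p :: List.filter (fun p => !(p.1 == k)) t := by
        simp [hp]
      rw [h1]
      by_cases hp' : p.1 = k'
      · rw [List.find?_cons_of_pos (by simp [hp']), List.find?_cons_of_pos (by simp [hp'])]
      · rw [List.find?_cons_of_neg (by simp [hp']), List.find?_cons_of_neg (by simp [hp']), ih]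

theorem getD_erase (d : PySem.Dict Int Int) (k k' : Int) (v : Int) :
    (d.erase k).getD k' v = if k' = k then v else d.getD k' v := by
  by_cases h : k' = k
  · subst h
    have hfind : (d.items.filter (fun p => !(p.1 == k'))).find? (fun p => p.1 == k') = none := by
      rw [List.find?_eq_none]
      intro x hx
      simp only [List.mem_filter] at hx
      simpa using hx.2
    simp [PySem.Dict.getD, PySem.Dict.get?, PySem.Dict.erase, hfind]
  · simp [PySem.Dict.getD, PySem.Dict.get?, PySem.Dict.erase, find?_filter_ne d.items k k' h, h]

theorem loopA_eq (rest : List Int) : ∀ (ans : Int) (d : PySem.Dict Int Int) (s : PySem.Set Int),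
    d.keys.Nodup →
    (∀ k, d.getD k 0 = (rest.count k : Int)) →
    (∀ k, k ∈ d.keys ↔ k ∈ rest) →
    loopA rest ans d s = ans + countSpec rest s := by
  induction rest with
  | nil => intro ans d s _ _ _; simp [loopA, countSpec]
  | cons x xs ih =>
    intro ans d s hnd hget hmem
    have hxk : x ∈ d.keys := (hmem x).2 (List.mem_cons_self)
    have hcont : d.contains x = true := (PySem.Dict.contains_iff_mem_keys d x).2 hxk
    have hk1 : (d.modify x 0 (· - 1)).keys = d.keys := by
      rw [PySem.Dict.keys_modify, PySem.Dict.keys_insert_of_contains _ _ hcont]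
    have hget1 : ∀ k, (d.modify x 0 (· - 1)).getD k 0 = (xs.count k : Int) := by
      intro k
      rw [PySem.Dict.getD_modify]
      by_cases hkx : k = x
      · subst hkx
        have := hget k
        rw [List.count_cons_self] at this
        simp only [this]
        push_cast
        ring
      · rw [if_neg hkx, hget k]
        have : xs.count k = (x :: xs).count k := by
          simp [Ne.symm hkx]
        rw [this]
    simp only [loopA]
    by_cases hzero : xs.count x = 0
    · -- dict.pop(x) happens
      have hcond : ((d.modify x 0 (· - 1)).getD x 0 == 0) = true := by
        simp [hget1 x, hzero]
      rw [if_pos hcond]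
      have hxnot : x ∉ xs := by
        rw [← List.count_eq_zero]; exact hzero
      set d2 := (d.modify x 0 (· - 1)).erase x with hd2
      have hk2 : d2.keys = (d.modify x 0 (· - 1)).keys.filter (fun a => !(a == x)) :=
        keys_erase_eq _ x
      have hnd2 : d2.keys.Nodup := by
        rw [hk2]; exact (hk1 ▸ hnd).filter _
      have hmem2 : ∀ k, k ∈ d2.keys ↔ k ∈ xs := by
        intro k
        rw [hk2, List.mem_filter, hk1]
        constructor
        · rintro ⟨hkd, hkx⟩
          have hcc : k ∈ x :: xs := (hmem k).1 hkd
          rcases List.mem_cons.1 hcc with h | h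
          · simp [h] at hkx
          · exact h
        · intro hkxs
          refine ⟨(hmem k).2 (List.mem_cons_of_mem _ hkxs), ?_⟩
          have : k ≠ x := fun h => hxnot (h ▸ hkxs)
          simp [this]
      have hget2 : ∀ k, d2.getD k 0 = (xs.count k : Int) := by
        intro k
        rw [hd2, getD_erase]
        by_cases hkx : k = x
        · subst hkx; simp [hzero]
        · rw [if_neg hkx, hget1 k]
      have hsz : d2.size = Dd xs := size_eq_Dd d2 xs hnd2 hmem2
      rw [ih _ d2 (PySem.Set.add s x) hnd2 hget2 hmem2]
      simp only [countSpec, hsz, PySem.Set.len]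
      by_cases hc : Dd xs = (PySem.Set.add s x).length
      · simp [hc]; ring
      · have hne : ((Dd xs : Int) == ((PySem.Set.add s x).length : Int)) = false := by
          simp [hc]
        simp [hne, hc]
    · -- key x stays
      have hcond : ¬ (((d.modify x 0 (· - 1)).getD x 0 == 0) = true) := by
        simp [hget1 x]; omega
      rw [if_neg hcond]
      have hxin : x ∈ xs := List.count_pos_iff.1 (Nat.pos_of_ne_zero hzero)
      have hmem2 : ∀ k, k ∈ (d.modify x 0 (· - 1)).keys ↔ k ∈ xs := by
        intro k
        rw [hk1, hmem k, List.mem_cons]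
        constructor
        · rintro (h | h)
          · exact h ▸ hxin
          · exact h
        · exact Or.inr
      have hnd1 : (d.modify x 0 (· - 1)).keys.Nodup := hk1 ▸ hnd
      have hsz : (d.modify x 0 (· - 1)).size = Dd xs := size_eq_Dd _ xs hnd1 hmem2
      rw [ih _ _ (PySem.Set.add s x) hnd1 hget1 hmem2]
      simp only [countSpec, hsz, PySem.Set.len]
      by_cases hc : Dd xs = (PySem.Set.add s x).length
      · simp [hc]; ring
      · have hne : ((Dd xs : Int) == ((PySem.Set.add s x).length : Int)) = false := by
          simp [hc]
        simp [hne, hc]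

theorem buildTable (xs : List Int) :
    (xs.foldr (fun x (st : List Int × PySem.Set Int) =>
        (PySem.Set.len (PySem.Set.add st.2 x) :: st.1, PySem.Set.add st.2 x))
      ([0], PySem.Set.empty)).1 = suffTable xs ∧
    (xs.foldr (fun x (st : List Int × PySem.Set Int) =>
        (PySem.Set.len (PySem.Set.add st.2 x) :: st.1, PySem.Set.add st.2 x))
      ([0], PySem.Set.empty)).2.Nodup ∧
    (∀ k, k ∈ (xs.foldr (fun x (st : List Int × PySem.Set Int) =>
        (PySem.Set.len (PySem.Set.add st.2 x) :: st.1, PySem.Set.add st.2 x))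
      ([0], PySem.Set.empty)).2 ↔ k ∈ xs) := by
  induction xs with
  | nil =>
    refine ⟨rfl, List.nodup_nil, by simp [PySem.Set.empty]⟩
  | cons x xs ih =>
    obtain ⟨h1, h2, h3⟩ := ih
    refine ⟨?_, PySem.Set.nodup_add _ x h2, ?_⟩
    · simp only [List.foldr_cons, h1, suffTable]
      congr 1
      have hmem : ∀ k, k ∈ PySem.Set.add (xs.foldr (fun x (st : List Int × PySem.Set Int) =>
          (PySem.Set.len (PySem.Set.add st.2 x) :: st.1, PySem.Set.add st.2 x))
          ([0], PySem.Set.empty)).2 x ↔ k ∈ x :: xs := by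
        intro k
        rw [PySem.Set.mem_add, List.mem_cons, h3 k]
        tauto
      have hlen := len_eq_Dd _ (x :: xs) (PySem.Set.nodup_add _ x h2) hmem
      exact congrArg Int.ofNat hlen
    · intro k
      simp only [List.foldr_cons, PySem.Set.mem_add, h3 k, List.mem_cons]
      tauto

theorem headD_suffTable (xs : List Int) : (suffTable xs).headD 0 = (Dd xs : Int) := by
  cases xs with
  | nil => simp [suffTable, Dd, PySem.Set.ofList]
  | cons x xs => rfl

theorem fwdB_eq (xs : List Int) : ∀ (left : PySem.Set Int),
    fwdB xs (suffTable xs).tail left = countSpec xs left := by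
  induction xs with
  | nil => intro left; rfl
  | cons x xs ih =>
    intro left
    show fwdB (x :: xs) (suffTable xs) left = countSpec (x :: xs) left
    simp only [fwdB, countSpec]
    rw [headD_suffTable, ih (PySem.Set.add left x)]
    by_cases hc : Dd xs = (PySem.Set.add left x).length
    · simp [PySem.Set.len, hc]
    · have : ¬ (((PySem.Set.add left x).length : Int) == (Dd xs : Int)) = true := by
        simp; omega
      simp [PySem.Set.len, this, hc]

theorem solution_eq_countSpec (topping : List Int) :
    solution topping = countSpec topping PySem.Set.empty := by
  unfold solution
  rw [loopA_eq topping 0 (PySem.Dict.counter topping) PySem.Set.empty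
      (PySem.Dict.nodup_keys_counter topping)
      (fun k => PySem.Dict.getD_counter topping k)
      (fun k => by rw [PySem.Dict.keys_counter]; exact PySem.Set.mem_ofList topping k)]
  ring

theorem solution_alt_eq_countSpec (topping : List Int) :
    solution_alt topping = countSpec topping PySem.Set.empty := by
  unfold solution_alt
  rw [List.foldl_reverse]
  have h := (buildTable topping).1
  simp only [h]
  exact fwdB_eq topping PySem.Set.empty

-- ===== VERDICT (by name: the statement is the Claim_ definition above) =====
theorem solution_spec : Claim_equal_solution := by
  intro topping _
  unfold Spec_solution
  rw [solution_eq_countSpec, solution_alt_eq_countSpec]
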